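-- pv_equiv track=rewrite | github.com/Costadoat/Informatique | TP/TP12 Dictionnaires/I-TP12.py | statistiques
-- ===== SOURCE A (Python) =====
-- def statistiques(texte):
--     '''renvoie un dictionnaire contenant le nombre
--     d'occurences de chaque caractère du texte
--     à l'exclusion des ponctuations, espaces et saut de ligne'''
--     occurrences = {}
--     for caractere in texte:
--         if caractere not in " ,;.:!?\n":
--             if caractere in occurrences:
--                 occurrences[caractere] = occurrences[caractere] + 1
--             else:
--                 occurrences[caractere]=1
--     return occurrences
-- ===== SOURCE B (Python) =====
-- def statistiques(texte):
--     '''renvoie un dictionnaire contenant le nombre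
--     d'occurences de chaque caractère du texte
--     à l'exclusion des ponctuations, espaces et saut de ligne'''
--     filtered = [c for c in texte if c not in " ,;.:!?\n"]
--     return {c: filtered.count(c) for c in dict.fromkeys(filtered)}
-- ===== Notes on version B (the rewrite author's own statement) =====
-- stated objective: alternative
-- what changed: B replaces A's single accumulating dict pass by a gather-then-count strategy: filter the text once, collect the distinct characters in first-occurrence order, then compute each count with list.count.
import Mathlib
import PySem

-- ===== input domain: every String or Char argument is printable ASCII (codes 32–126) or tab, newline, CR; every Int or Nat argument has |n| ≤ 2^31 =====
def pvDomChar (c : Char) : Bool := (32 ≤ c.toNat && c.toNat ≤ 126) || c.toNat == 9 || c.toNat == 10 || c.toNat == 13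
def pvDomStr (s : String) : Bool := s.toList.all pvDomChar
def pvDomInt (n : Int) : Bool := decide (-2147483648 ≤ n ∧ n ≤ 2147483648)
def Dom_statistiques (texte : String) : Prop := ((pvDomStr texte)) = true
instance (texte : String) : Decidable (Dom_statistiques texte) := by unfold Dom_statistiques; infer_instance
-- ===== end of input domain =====

-- B counts differently (gather distinct characters, then count each); same return value as A.

def pvPunct : List Char := " ,;.:!?\n".toList

-- ===== PORT A =====
def statistiques (texte : String) : List (String × Int) :=
  (texte.toList.foldl
    (fun (occurrences : PySem.Dict String Int) caractere =>
      if ¬ pvPunct.contains caractere then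
        if occurrences.contains (String.ofList [caractere]) then
          occurrences.insert (String.ofList [caractere])
            (occurrences.getD (String.ofList [caractere]) 0 + 1)
        else
          occurrences.insert (String.ofList [caractere]) 1
      else occurrences)
    PySem.Dict.empty).items

-- ===== PORT B =====
def statistiques_alt (texte : String) : List (String × Int) :=
  let filtered := (texte.toList.filter (fun c => ¬ pvPunct.contains c)).map (fun c => String.ofList [c])
  (PySem.List.dedup filtered).map (fun s => (s, (filtered.count s : Int)))

-- ===== PRECONDITION & SPEC =====
def Spec_statistiques (texte : String) (out : List (String × Int)) : Prop := out = statistiques_alt texte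
instance (texte : String) (out : List (String × Int)) : Decidable (Spec_statistiques texte out) := by unfold Spec_statistiques; infer_instance

-- ===== CLAIM (what is proved, stated in full; the proofs are below) =====
def Claim_equal_statistiques : Prop := ∀ (texte : String), Dom_statistiques texte → Spec_statistiques texte (statistiques texte)

-- ===== LEMMAS AND PROOFS =====

-- A's inner branch is exactly a Counter update d[k] = d.get(k, 0) + 1
lemma step_eq_modify (d : PySem.Dict String Int) (k : String) :
    (if d.contains k then d.insert k (d.getD k 0 + 1) else d.insert k 1) =
      d.modify k 0 (· + 1) := by
  by_cases h : d.contains k = true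
  · simp [h, PySem.Dict.modify, PySem.Dict.getD]
  · have hn : d.get? k = none := (PySem.Dict.get?_eq_none_iff_contains d k).mpr (by simpa using h)
    simp [h, hn, PySem.Dict.modify, PySem.Dict.getD]

-- A's punctuation-skipping loop is the Counter loop over the filtered, string-mapped list
lemma foldl_eq_counter_loop (l : List Char) (d : PySem.Dict String Int) :
    l.foldl
      (fun (occurrences : PySem.Dict String Int) caractere =>
        if ¬ pvPunct.contains caractere then
          if occurrences.contains (String.ofList [caractere]) then
            occurrences.insert (String.ofList [caractere])
              (occurrences.getD (String.ofList [caractere]) 0 + 1)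
          else
            occurrences.insert (String.ofList [caractere]) 1
        else occurrences) d =
    ((l.filter (fun c => ¬ pvPunct.contains c)).map (fun c => String.ofList [c])).foldl
      (fun d x => d.modify x 0 (· + 1)) d := by
  induction l generalizing d with
  | nil => rfl
  | cons c l ih =>
    simp only [List.foldl_cons, List.filter_cons]
    by_cases h : c ∈ pvPunct
    · simpa [h] using ih d
    · simpa [h, step_eq_modify] using ih (d.modify (String.ofList [c]) 0 (· + 1))

-- ===== VERDICT (by name: the statement is the Claim_ definition above) =====
theorem statistiques_spec : Claim_equal_statistiques := by
  intro texte _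
  show _ = _
  rw [statistiques, statistiques_alt, foldl_eq_counter_loop,
      ← PySem.Dict.counter_eq_foldl, PySem.Dict.items_counter]
  simp
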